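-- pv_equiv track=rewrite | github.com/dan-sazonov/olymp-playground | ЕГЭ/22/13416.py | f
-- ===== SOURCE A (Python) =====
-- def f(x):
--     a = b = 0
--     while x > 0:
--         a += 1
--         if x % 2 == 0:
--             b += x % 10
--         x //= 10
--     return a, b
-- ===== SOURCE B (Python) =====
-- def f(x):
--     if x <= 0:
--         return 0, 0
--     s = str(x)
--     return len(s), sum(int(c) for c in s if int(c) % 2 == 0)
-- ===== Notes on version B (the rewrite author's own statement) =====
-- stated objective: idiomatic
-- what changed: B replaces A's modulo/floor-division accumulator loop with the idiomatic str(x) route: length of the decimal string plus a sum over its digit characters filtered by parity, with a non-positive guard matching A's empty loop.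
import Mathlib
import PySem

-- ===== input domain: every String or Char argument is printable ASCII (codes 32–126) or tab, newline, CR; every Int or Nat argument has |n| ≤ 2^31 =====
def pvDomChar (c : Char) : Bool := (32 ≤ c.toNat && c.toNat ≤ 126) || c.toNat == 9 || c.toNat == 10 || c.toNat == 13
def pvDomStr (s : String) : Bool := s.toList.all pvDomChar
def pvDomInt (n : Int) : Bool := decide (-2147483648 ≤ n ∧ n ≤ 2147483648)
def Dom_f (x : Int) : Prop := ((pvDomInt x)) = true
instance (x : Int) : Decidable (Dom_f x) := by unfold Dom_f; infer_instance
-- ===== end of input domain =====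

-- B replaces A's modulo/floor-division loop with the idiomatic str(x) route (length + parity-filtered digit sum); same cost, no speed claim.


-- ===== PORT A =====
-- the 'while x > 0' loop with accumulators a, b
def fGo (x a b : Int) : Int × Int :=
  if _h : 0 < x then
    fGo (PySem.Int.floordiv x 10) (a + 1)
      (if PySem.Int.mod x 2 = 0 then b + PySem.Int.mod x 10 else b)
  else (a, b)
termination_by x.toNat
decreasing_by
  simp only [PySem.Int.floordiv, Int.fdiv_eq_ediv]
  omega

def f (x : Int) : Int × Int := fGo x 0 0

-- ===== PORT B =====
-- int(c): exact for the decimal digit characters '0'..'9' produced by str(x) for x > 0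
def digitVal (c : Char) : Int := (c.toNat : Int) - 48

def f_alt (x : Int) : Int × Int :=
  if x ≤ 0 then (0, 0)
  else
    let s := PySem.Int.toStr x
    (PySem.Str.len s,
     s.toList.foldl
       (fun acc c => if PySem.Int.mod (digitVal c) 2 = 0 then acc + digitVal c else acc) 0)

-- ===== PRECONDITION & SPEC =====
def Spec_f (x : Int) (out : Int × Int) : Prop := out = f_alt x
instance (x : Int) (out : Int × Int) : Decidable (Spec_f x out) := by unfold Spec_f; infer_instance

-- ===== CLAIM (what is proved, stated in full; the proofs are below) =====
def Claim_equal_f : Prop := ∀ (x : Int), Dom_f x → Spec_f x (f x)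

-- ===== LEMMAS AND PROOFS =====

-- decimal representation of n, most significant digit first (the shape Nat.toDigits produces)
def rep (n : Nat) : List Char :=
  if _h : n < 10 then [Nat.digitChar n]
  else rep (n / 10) ++ [Nat.digitChar (n % 10)]
termination_by n
decreasing_by omega

-- even-digit contribution of one char
def gch (c : Char) : Int := if PySem.Int.mod (digitVal c) 2 = 0 then digitVal c else 0

lemma digitVal_digitChar (d : Nat) (hd : d < 10) : digitVal (Nat.digitChar d) = (d : Int) := by
  interval_cases d <;> rfl

lemma toDigitsCore_eq (fuel : Nat) : ∀ (n : Nat) (acc : List Char), n < fuel →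
    Nat.toDigitsCore 10 fuel n acc = rep n ++ acc := by
  induction fuel with
  | zero => intro n acc h; omega
  | succ fuel ih =>
    intro n acc h
    rw [Nat.toDigitsCore]
    by_cases h0 : n / 10 = 0
    · have hn : n < 10 := by omega
      have : n % 10 = n := Nat.mod_eq_of_lt hn
      simp [h0, rep, hn, this]
    · have hn : ¬ n < 10 := by omega
      simp only [h0, if_false]
      rw [ih (n / 10) _ (by omega)]
      conv_rhs => rw [rep]
      simp [hn]

lemma toDigits_eq_rep (n : Nat) : Nat.toDigits 10 n = rep n := by
  have := toDigitsCore_eq (n + 1) n [] (by omega)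
  simpa [Nat.toDigits] using this

lemma foldl_gch (cs : List Char) : ∀ (b : Int),
    cs.foldl (fun acc c => if PySem.Int.mod (digitVal c) 2 = 0 then acc + digitVal c else acc) b
      = b + (cs.map gch).sum := by
  induction cs with
  | nil => intro b; simp
  | cons c cs ih =>
    intro b
    simp only [List.foldl_cons, List.map_cons, List.sum_cons, ih, gch]
    split_ifs <;> ring

lemma mod_two_nat (n : Nat) : PySem.Int.mod (n : Int) 2 = ((n % 2 : Nat) : Int) := by
  simp [PySem.Int.mod, Int.fmod_eq_emod]

lemma mod_ten_nat (n : Nat) : PySem.Int.mod (n : Int) 10 = ((n % 10 : Nat) : Int) := by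
  simp [PySem.Int.mod, Int.fmod_eq_emod]

lemma gch_digitChar (d : Nat) (hd : d < 10) :
    gch (Nat.digitChar d) = if d % 2 = 0 then (d : Int) else 0 := by
  unfold gch
  rw [digitVal_digitChar d hd, mod_two_nat d]
  by_cases h : d % 2 = 0 <;> simp [h] <;> omega

lemma fGo_rep (n : Nat) : 0 < n → ∀ (a b : Int),
    fGo (n : Int) a b = (a + ((rep n).length : Int), b + ((rep n).map gch).sum) := by
  induction n using Nat.strong_induction_on with
  | _ n ih =>
    intro hn a b
    rw [fGo]
    have hpos : 0 < (n : Int) := by exact_mod_cast hn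
    have hdiv : PySem.Int.floordiv (n : Int) 10 = ((n / 10 : Nat) : Int) := by
      simp [PySem.Int.floordiv, Int.fdiv_eq_ediv]
    have hm2 := mod_two_nat n
    have hm10 := mod_ten_nat n
    simp only [hpos, dif_pos, hdiv, hm2, hm10]
    by_cases hlt : n < 10
    · have h0 : n / 10 = 0 := by omega
      have hmod : n % 10 = n := Nat.mod_eq_of_lt hlt
      rw [h0]
      rw [fGo]
      simp only [Int.natCast_zero, lt_irrefl, dite_false]
      rw [rep]
      simp only [hlt, dif_pos, List.length_singleton, List.map_cons, List.map_nil,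
        List.sum_cons, List.sum_nil, add_zero]
      rw [gch_digitChar n hlt, hmod]
      by_cases he : n % 2 = 0 <;> simp [he] <;> push_cast <;> omega
    · have hq : 0 < n / 10 := by omega
      rw [ih (n / 10) (by omega) hq]
      conv_rhs => rw [rep]
      simp only [hlt, dite_false, List.length_append, List.map_append, List.sum_append,
        List.length_singleton, List.map_cons, List.map_nil, List.sum_cons, List.sum_nil, add_zero]
      rw [gch_digitChar (n % 10) (by omega)]
      have h2 : n % 2 = n % 10 % 2 := by omega
      by_cases he : n % 2 = 0
      · have he' : n % 10 % 2 = 0 := by omega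
        refine Prod.ext ?_ ?_ <;> (push_cast [he, he']; try ring) <;> (simp; ring)
      · have he' : ¬ (n % 10 % 2 = 0) := by omega
        have hne : ¬ (((n % 2 : Nat) : Int) = 0) := by exact_mod_cast he
        rw [if_neg hne, if_neg he']
        refine Prod.ext ?_ ?_ <;> push_cast <;> ring

-- ===== VERDICT (by name: the statement is the Claim_ definition above) =====
theorem f_spec : Claim_equal_f := by
  intro x _
  unfold Spec_f f f_alt
  by_cases hx : x ≤ 0
  · rw [fGo]
    simp [hx, not_lt.mpr hx]
  · have hpos : 0 < x := by omega
    have hn : x = ((x.toNat : Nat) : Int) := by omega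
    have hnpos : 0 < x.toNat := by omega
    simp only [hx, if_false]
    rw [PySem.Int.toList_toStr]
    have htc : PySem.Int.toChars x = rep x.toNat := by
      unfold PySem.Int.toChars
      rw [if_neg (by omega), toDigits_eq_rep]
    rw [foldl_gch]
    have hlen : PySem.Str.len (PySem.Int.toStr x) = ((rep x.toNat).length : Int) := by
      simp [PySem.Str.len, PySem.Int.toList_toStr, htc]
    rw [hlen, htc]
    have hmain := fGo_rep x.toNat hnpos 0 0
    rw [← hn] at hmain
    rw [hmain]
    simp
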